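-- pv_equiv track=rewrite | github.com/pypi-data/pypi-mirror-229 | packages/aaei/aaei-1.5.0.tar.gz/aaei-1.5.0/AAEI/AEI_PV.py | EUAQI
-- ===== SOURCE A (Python) =====
-- def EUAQI(NO2=50,O3=10,PM10=35,PM25=24,SO2=187): # All units ug/m3
--     NO2_limits = [0, 40, 90, 120, 230, 340, 1000]
--     O3_limits = [0, 50, 100, 130, 240, 380, 800]
--     PM10_limits = [0, 10, 20, 25, 50, 75, 800]
--     PM25_limits = [0, 20, 40, 50, 100, 150, 1200]
--     SO2_limits = [0, 100, 200, 350, 500, 750, 1250]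
--     bin_list = [NO2_limits, O3_limits, PM10_limits, PM25_limits, SO2_limits]
--     Result = [0,0,0,0,0,0]
--     for i,x in enumerate([NO2,O3,PM10,PM25,SO2]):
--         for j,y in enumerate(bin_list[i]):
--             if x > y:
--                 Result[i] = j+1
--     Result[-1] = max(Result)
--     return Result
-- ===== SOURCE B (Python) =====
-- def _bisect_left(a, x):
--     # standard binary search (bisect.bisect_left): number of elements < x in ascending a
--     lo, hi = 0, len(a)
--     while lo < hi:
--         mid = (lo + hi) // 2
--         if a[mid] < x:
--             lo = mid + 1
--         else:
--             hi = mid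
--     return lo
--
--
-- def EUAQI(NO2=50, O3=10, PM10=35, PM25=24, SO2=187):  # All units ug/m3
--     bins = [
--         (NO2, [0, 40, 90, 120, 230, 340, 1000]),
--         (O3, [0, 50, 100, 130, 240, 380, 800]),
--         (PM10, [0, 10, 20, 25, 50, 75, 800]),
--         (PM25, [0, 20, 40, 50, 100, 150, 1200]),
--         (SO2, [0, 100, 200, 350, 500, 750, 1250]),
--     ]
--     res = [_bisect_left(limits, x) for x, limits in bins]
--     res.append(max(res))
--     return res
-- ===== Notes on version B (the rewrite author's own statement) =====
-- stated objective: alternative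
-- what changed: Each pollutant's bin is computed by a binary search (bisect_left on the ascending limit list) over a zipped value/limits table with the max appended, instead of A's pre-initialised 6-slot list mutated by a full linear scan over every limit.
import Mathlib
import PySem

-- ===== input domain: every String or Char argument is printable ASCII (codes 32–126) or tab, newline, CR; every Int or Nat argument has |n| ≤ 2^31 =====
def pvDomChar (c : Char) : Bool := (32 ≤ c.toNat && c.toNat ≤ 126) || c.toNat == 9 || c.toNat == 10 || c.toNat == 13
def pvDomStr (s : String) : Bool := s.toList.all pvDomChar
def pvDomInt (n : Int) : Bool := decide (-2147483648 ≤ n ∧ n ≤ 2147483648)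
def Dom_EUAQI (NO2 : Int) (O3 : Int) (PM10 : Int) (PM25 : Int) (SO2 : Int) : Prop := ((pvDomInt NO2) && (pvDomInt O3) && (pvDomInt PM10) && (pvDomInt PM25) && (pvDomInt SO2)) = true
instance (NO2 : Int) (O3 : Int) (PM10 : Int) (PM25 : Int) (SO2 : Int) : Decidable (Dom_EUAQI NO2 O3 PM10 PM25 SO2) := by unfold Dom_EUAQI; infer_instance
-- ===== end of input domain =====

-- B computes each pollutant's bin by binary search (bisect_left) on the ascending limit list and appends the max,
-- instead of A's pre-initialised 6-slot list mutated by a full linear scan of every limit; same return value.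

-- ===== PORT A =====
def EUAQI (NO2 : Int) (O3 : Int) (PM10 : Int) (PM25 : Int) (SO2 : Int) : List Int :=
  let NO2_limits : List Int := [0, 40, 90, 120, 230, 340, 1000]
  let O3_limits : List Int := [0, 50, 100, 130, 240, 380, 800]
  let PM10_limits : List Int := [0, 10, 20, 25, 50, 75, 800]
  let PM25_limits : List Int := [0, 20, 40, 50, 100, 150, 1200]
  let SO2_limits : List Int := [0, 100, 200, 350, 500, 750, 1250]
  let bin_list := [NO2_limits, O3_limits, PM10_limits, PM25_limits, SO2_limits]
  let result : List Int := [0, 0, 0, 0, 0, 0]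
  let result :=
    (PySem.List.enumerate [NO2, O3, PM10, PM25, SO2]).foldl
      (fun res ix =>
        (PySem.List.enumerate (PySem.List.pyGetD bin_list ix.1 [])).foldl
          (fun r jy => if ix.2 > jy.2 then PySem.List.pySetD r ix.1 (jy.1 + 1) else r) res)
      result
  -- max(Result): Result is always a nonempty literal, so max? is some and the getD default is never taken
  let m := (PySem.List.max? result (fun v => v)).getD 0
  PySem.List.pySetD result (-1) m

-- ===== PORT B =====
def EUAQI_alt (NO2 : Int) (O3 : Int) (PM10 : Int) (PM25 : Int) (SO2 : Int) : List Int :=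
  let bins : List (Int × List Int) :=
    [(NO2, [0, 40, 90, 120, 230, 340, 1000]),
     (O3, [0, 50, 100, 130, 240, 380, 800]),
     (PM10, [0, 10, 20, 25, 50, 75, 800]),
     (PM25, [0, 20, 40, 50, 100, 150, 1200]),
     (SO2, [0, 100, 200, 350, 500, 750, 1250])]
  -- _bisect_left in Source B is exactly bisect.bisect_left's lo/hi loop, i.e. the PySem primitive
  let res : List Int := bins.map (fun xl => (PySem.List.bisectLeft xl.2 xl.1 : Int))
  res ++ [(PySem.List.max? res (fun v => v)).getD 0]

-- ===== PRECONDITION & SPEC =====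
def Spec_EUAQI (NO2 : Int) (O3 : Int) (PM10 : Int) (PM25 : Int) (SO2 : Int) (out : List Int) : Prop := out = EUAQI_alt NO2 O3 PM10 PM25 SO2
instance (NO2 : Int) (O3 : Int) (PM10 : Int) (PM25 : Int) (SO2 : Int) (out : List Int) : Decidable (Spec_EUAQI NO2 O3 PM10 PM25 SO2 out) := by unfold Spec_EUAQI; infer_instance

-- ===== CLAIM (what is proved, stated in full; the proofs are below) =====
def Claim_equal_EUAQI : Prop := ∀ (NO2 : Int) (O3 : Int) (PM10 : Int) (PM25 : Int) (SO2 : Int), Dom_EUAQI NO2 O3 PM10 PM25 SO2 → Spec_EUAQI NO2 O3 PM10 PM25 SO2 (EUAQI NO2 O3 PM10 PM25 SO2)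

-- ===== LEMMAS AND PROOFS =====

/-- Value A's inner loop leaves in `Result[i]` when that slot currently holds `v`
    and `enumerate` starts at `s`. -/
def scanFrom : List Int → Int → Int → Int → Int
  | [], _, _, v => v
  | y :: t, x, s, v => scanFrom t x (s + 1) (if x > y then s + 1 else v)

lemma inner_fold (L : List Int) (x : Int) (i : Int) (res : List Int) (s : Int)
    (h0 : 0 ≤ i) (h1 : i.toNat < res.length) :
    (PySem.List.enumerate L s).foldl
      (fun r (jy : Int × Int) => if x > jy.2 then PySem.List.pySetD r i (jy.1 + 1) else r) res
    = res.set i.toNat (scanFrom L x s (res.getD i.toNat 0)) := by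
  induction L generalizing res s with
  | nil =>
      simp only [PySem.List.enumerate_nil, List.foldl_nil, scanFrom]
      rw [List.getD_eq_getElem res 0 h1, List.set_getElem_self]
  | cons y t ih =>
      rw [PySem.List.enumerate_cons, List.foldl_cons]
      simp only [scanFrom]
      by_cases hxy : x > y
      · simp only [hxy, if_true]
        rw [ih _ _ (by rwa [PySem.List.length_pySetD])]
        simp [PySem.List.pySetD_of_nonneg res (s + 1) h0,
          List.getElem_set_self, List.set_set, h1]
      · simp only [hxy, if_false]
        exact ih _ _ h1

lemma inner_len (L : List Int) (x i : Int) (res : List Int) (s : Int) :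
    ((PySem.List.enumerate L s).foldl
      (fun r (jy : Int × Int) => if x > jy.2 then PySem.List.pySetD r i (jy.1 + 1) else r) res).length
    = res.length := by
  induction L generalizing res s with
  | nil => simp [PySem.List.enumerate_nil]
  | cons y t ih =>
      rw [PySem.List.enumerate_cons, List.foldl_cons, ih]
      split <;> simp [PySem.List.length_pySetD]

lemma scan_bisect_NO2 (x : Int) :
    scanFrom [0, 40, 90, 120, 230, 340, 1000] x 0 0
      = (PySem.List.bisectLeft [0, 40, 90, 120, 230, 340, 1000] x : Int) := by
  norm_num [scanFrom, PySem.List.bisectLeft, PySem.List.bisectLeftLoop]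
  split_ifs <;> omega

lemma scan_bisect_O3 (x : Int) :
    scanFrom [0, 50, 100, 130, 240, 380, 800] x 0 0
      = (PySem.List.bisectLeft [0, 50, 100, 130, 240, 380, 800] x : Int) := by
  norm_num [scanFrom, PySem.List.bisectLeft, PySem.List.bisectLeftLoop]
  split_ifs <;> omega

lemma scan_bisect_PM10 (x : Int) :
    scanFrom [0, 10, 20, 25, 50, 75, 800] x 0 0
      = (PySem.List.bisectLeft [0, 10, 20, 25, 50, 75, 800] x : Int) := by
  norm_num [scanFrom, PySem.List.bisectLeft, PySem.List.bisectLeftLoop]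
  split_ifs <;> omega

lemma scan_bisect_PM25 (x : Int) :
    scanFrom [0, 20, 40, 50, 100, 150, 1200] x 0 0
      = (PySem.List.bisectLeft [0, 20, 40, 50, 100, 150, 1200] x : Int) := by
  norm_num [scanFrom, PySem.List.bisectLeft, PySem.List.bisectLeftLoop]
  split_ifs <;> omega

lemma scan_bisect_SO2 (x : Int) :
    scanFrom [0, 100, 200, 350, 500, 750, 1250] x 0 0
      = (PySem.List.bisectLeft [0, 100, 200, 350, 500, 750, 1250] x : Int) := by
  norm_num [scanFrom, PySem.List.bisectLeft, PySem.List.bisectLeftLoop]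
  split_ifs <;> omega

-- ===== VERDICT (by name: the statement is the Claim_ definition above) =====
theorem EUAQI_spec : Claim_equal_EUAQI := by
  intro n o p q s _
  unfold Spec_EUAQI
  simp only [EUAQI, PySem.List.enumerate_cons, PySem.List.enumerate_nil,
    List.foldl_cons, List.foldl_nil]
  rw [inner_fold _ _ _ _ _ (by norm_num) (by simp only [inner_len]; norm_num)]
  rw [inner_fold _ _ _ _ _ (by norm_num) (by simp only [inner_len]; norm_num)]
  rw [inner_fold _ _ _ _ _ (by norm_num) (by simp only [inner_len]; norm_num)]
  rw [inner_fold _ _ _ _ _ (by norm_num) (by simp only [inner_len]; norm_num)]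
  rw [inner_fold _ _ _ _ _ (by norm_num) (by norm_num)]
  norm_num [List.set, List.getD, PySem.List.pyGetD,
    show Int.toNat 2 = 2 from rfl, show Int.toNat 3 = 3 from rfl, show Int.toNat 4 = 4 from rfl]
  rw [PySem.List.max?_id_cons]
  simp only [Option.getD_some]
  norm_num [PySem.List.pySetD, PySem.List.pySet?, PySem.List.pyIdx?]
  rw [scan_bisect_NO2, scan_bisect_O3, scan_bisect_PM10, scan_bisect_PM25, scan_bisect_SO2]
  simp only [EUAQI_alt, List.map_cons, List.map_nil, List.cons_append, List.nil_append]
  rw [PySem.List.max?_id_cons]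
  simp only [Option.getD_some, List.foldl_cons, List.foldl_nil]
  simp only [List.cons.injEq, and_true, true_and]
  rw [max_eq_left (Int.natCast_nonneg _)]
  ac_rfl
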